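-- pv_equiv track=rewrite | github.com/MatteoGiomi/dataslicer | dataslicer/df_utils.py | strlist_in_strlist
-- ===== SOURCE A (Python) =====
-- def stringinlist(key, list_of_keys):
--     """
--         check if a string key is present at least once in list_of_keys.
--         This supports '*' as wildchar:
--
--             >> ll = ['apple_gala', 'fuffa', 'apple_fuji', 'bananas']
--             >> stringinlist('appl*', ll)
--             >> True
--             >> stringinlist('app', ll)
--             >> False
--             >> stringinlist('fuffa', ll)
--             >> True
--             >> stringinlist('fu*', ll)
--             >> True
--     """
--     if '*' in key:
--         mk = key.replace('*', '')
--         return any([mk in key_from_list for key_from_list in list_of_keys])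
--     else:
--         return (key in list_of_keys)
--
-- def strlist_in_strlist(strlist1, strlist2):
--     """
--         check if strlist1 is contained in strlist2. Primitive wildchar support.
--     """
--     ifound = 0
--     for str1 in strlist1:
--         if stringinlist(str1, strlist2):
--             ifound += 1
--     if ifound == len(strlist1):
--         return True
--     else:
--         return False
-- ===== SOURCE B (Python) =====
-- def strlist_in_strlist(strlist1, strlist2):
--     """check if strlist1 is contained in strlist2. Primitive wildchar support."""
--     # loop inversion: scan strlist2 once, shrinking the worklists of still-unmatched patterns
--     pending_exact = set()
--     pending_wild = []
--     for p in strlist1: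
--         if '*' in p:
--             pending_wild.append(p.replace('*', ''))
--         else:
--             pending_exact.add(p)
--     for s in strlist2:
--         if not pending_exact and not pending_wild:
--             break
--         pending_exact.discard(s)
--         pending_wild = [t for t in pending_wild if t not in s]
--     return not pending_exact and not pending_wild
-- ===== Notes on version B (the rewrite author's own statement) =====
-- stated objective: faster
-- what changed: Inverts the loop structure: instead of A's per-pattern scan of strlist2 with a match counter compared to len(strlist1), B preprocesses strlist1 once into a pending set of exact patterns and a pending list of wildcard needles, then scans strlist2 a single time, discarding each scanned string from the exact set in O(1) and filtering matched needles out of the shrinking wildcard worklist (early exit once both are empty), returning True iff nothing is left pending.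
import Mathlib
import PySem

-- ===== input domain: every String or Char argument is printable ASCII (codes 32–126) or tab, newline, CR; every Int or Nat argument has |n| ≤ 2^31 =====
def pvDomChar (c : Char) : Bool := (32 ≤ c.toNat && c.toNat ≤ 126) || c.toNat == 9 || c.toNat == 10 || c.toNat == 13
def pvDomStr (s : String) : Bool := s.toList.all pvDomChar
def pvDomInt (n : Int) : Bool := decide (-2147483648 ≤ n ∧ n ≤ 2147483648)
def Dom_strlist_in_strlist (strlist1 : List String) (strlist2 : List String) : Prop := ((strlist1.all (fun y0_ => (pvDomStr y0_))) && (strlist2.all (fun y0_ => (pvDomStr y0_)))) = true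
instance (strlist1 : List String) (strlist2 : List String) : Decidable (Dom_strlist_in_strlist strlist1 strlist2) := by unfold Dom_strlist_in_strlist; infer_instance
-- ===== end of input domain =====

-- B inverts the traversal: it preprocesses strlist1 into pending worklists (a set of exact
-- patterns, a list of wildcard needles) and scans strlist2 once, shrinking them, instead of
-- A's per-pattern scan of strlist2 with a counter (objective: faster as measured by the check).


-- ===== PORT A =====
def stringinlist (key : String) (list_of_keys : List String) : Bool :=
  if PySem.Str.isIn "*" key then
    let mk := PySem.Str.replace key "*" ""
    list_of_keys.any (fun key_from_list => PySem.Str.isIn mk key_from_list)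
  else
    list_of_keys.contains key

def strlist_in_strlist (strlist1 : List String) (strlist2 : List String) : Bool :=
  let ifound : Int := strlist1.foldl
    (fun ifound str1 => if stringinlist str1 strlist2 then ifound + 1 else ifound) 0
  if ifound = (strlist1.length : Int) then true else false

-- ===== PORT B =====
def strlist_in_strlist_alt (strlist1 : List String) (strlist2 : List String) : Bool :=
  let init : PySem.Set String × List String := strlist1.foldl
    (fun acc p =>
      if PySem.Str.isIn "*" p then (acc.1, acc.2 ++ [PySem.Str.replace p "*" ""])
      else (PySem.Set.add acc.1 p, acc.2))
    (PySem.Set.empty, [])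
  let fin := strlist2.foldl
    (fun (acc : PySem.Set String × List String) s =>
      if acc.1.isEmpty && acc.2.isEmpty then acc
      else (PySem.Set.discard acc.1 s, acc.2.filter (fun t => !PySem.Str.isIn t s)))
    init
  fin.1.isEmpty && fin.2.isEmpty

-- ===== PRECONDITION & SPEC =====
def Spec_strlist_in_strlist (strlist1 : List String) (strlist2 : List String) (out : Bool) : Prop := out = strlist_in_strlist_alt strlist1 strlist2
instance (strlist1 : List String) (strlist2 : List String) (out : Bool) : Decidable (Spec_strlist_in_strlist strlist1 strlist2 out) := by unfold Spec_strlist_in_strlist; infer_instance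

-- ===== CLAIM (what is proved, stated in full; the proofs are below) =====
def Claim_equal_strlist_in_strlist : Prop := ∀ (strlist1 : List String) (strlist2 : List String), Dom_strlist_in_strlist strlist1 strlist2 → Spec_strlist_in_strlist strlist1 strlist2 (strlist_in_strlist strlist1 strlist2)

-- ===== LEMMAS AND PROOFS =====

-- A's counter computes the number of matching patterns.
theorem foldl_count (P : String → Bool) :
    ∀ (l : List String) (n : Int),
      l.foldl (fun m s => if P s then m + 1 else m) n = n + ((l.filter P).length : Int) := by
  intro l
  induction l with
  | nil => intro n; simp
  | cons x xs ih =>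
    intro n
    by_cases h : P x = true
    · simp [List.foldl_cons, h, ih]; omega
    · simp [List.foldl_cons, h, ih]

-- A returns true iff every pattern matches.
theorem strlist_in_strlist_eq_all (l1 l2 : List String) :
    strlist_in_strlist l1 l2 = l1.all (fun p => stringinlist p l2) := by
  unfold strlist_in_strlist
  rw [foldl_count]
  by_cases h : (l1.filter (fun p => stringinlist p l2)).length = l1.length
  · have hall : l1.all (fun p => stringinlist p l2) = true := by
      rw [List.all_eq_true]
      intro x hx
      by_contra hP
      have hlt : (l1.filter (fun p => stringinlist p l2)).length < l1.length :=
        (List.length_filter_lt_length_iff_exists (l := l1)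
          (p := fun p => stringinlist p l2)).2 ⟨x, hx, hP⟩
      omega
    simp [h, hall]
  · have hne : (0 : Int) + ((l1.filter (fun p => stringinlist p l2)).length : Int)
        ≠ (l1.length : Int) := by
      intro hc; apply h; omega
    have hnall : l1.all (fun p => stringinlist p l2) = false := by
      rw [Bool.eq_false_iff]
      intro hc
      exact h (List.length_filter_eq_length_iff.mpr (List.all_eq_true.mp hc))
    rw [hnall, if_neg hne]

-- Bridge: the wildcard test in chars normal form.
theorem str_isIn_star (p : String) : PySem.Str.isIn "*" p = PySem.Chars.isIn ['*'] p.toList := by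
  simp

-- B's first loop partitions strlist1 into the exact-pattern set and the wildcard-needle list.
theorem foldl_split :
    ∀ (l1 : List String) (e : PySem.Set String) (w : List String),
      l1.foldl (fun (acc : PySem.Set String × List String) p =>
          if PySem.Str.isIn "*" p then (acc.1, acc.2 ++ [PySem.Str.replace p "*" ""])
          else (PySem.Set.add acc.1 p, acc.2)) (e, w)
        = ((l1.filter (fun p => !PySem.Str.isIn "*" p)).foldl
             (fun s b => PySem.Set.add s b) e,
           w ++ (l1.filter (fun p => PySem.Str.isIn "*" p)).map
             (fun p => PySem.Str.replace p "*" "")) := by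
  intro l1
  induction l1 with
  | nil => intro e w; simp
  | cons p t ih =>
    intro e w
    rw [List.foldl_cons]
    by_cases h : PySem.Str.isIn "*" p = true
    · rw [if_pos h, ih, List.filter_cons, List.filter_cons, h]
      simp
    · have hf : PySem.Str.isIn "*" p = false := by rwa [Bool.not_eq_true] at h
      rw [if_neg h, ih, List.filter_cons, List.filter_cons, hf]
      simp

-- Membership in the exact-pattern set.
theorem mem_foldl_add' :
    ∀ (l : List String) (e : PySem.Set String) (y : String),
      y ∈ l.foldl (fun s b => PySem.Set.add s b) e ↔ y ∈ e ∨ y ∈ l := by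
  intro l
  induction l with
  | nil => simp
  | cons a t ih =>
    intro e y
    rw [List.foldl_cons, ih]
    rw [PySem.Set.mem_add]
    simp
    tauto

-- One step of B's second loop is a plain (discard, filter) step (the early-exit branch is the
-- identity on the pair ([], [])).
theorem step2_eq (acc : PySem.Set String × List String) (s : String) :
    (if acc.1.isEmpty && acc.2.isEmpty then acc
     else (PySem.Set.discard acc.1 s, acc.2.filter (fun t => !PySem.Str.isIn t s)))
      = (PySem.Set.discard acc.1 s, acc.2.filter (fun t => !PySem.Str.isIn t s)) := by
  obtain ⟨a, b⟩ := acc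
  cases a <;> cases b <;> simp [PySem.Set.discard]

-- B's whole second loop filters both worklists by "no string of l2 matches".
theorem foldl_step2 :
    ∀ (l2 : List String) (acc : PySem.Set String × List String),
      l2.foldl
        (fun (acc : PySem.Set String × List String) s =>
          if acc.1.isEmpty && acc.2.isEmpty then acc
          else (PySem.Set.discard acc.1 s, acc.2.filter (fun t => !PySem.Str.isIn t s))) acc
        = (acc.1.filter (fun x => l2.all (fun s => !(x == s))),
           acc.2.filter (fun t => l2.all (fun s => !PySem.Str.isIn t s))) := by
  intro l2
  induction l2 with
  | nil => intro acc; simp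
  | cons s l2 ih =>
    intro acc
    rw [List.foldl_cons, step2_eq, ih]
    simp [PySem.Set.discard, List.filter_filter, Bool.and_comm]

-- Branch characterisations of A's helper.
theorem stringinlist_wild' (p : String) (l2 : List String)
    (hw : PySem.Chars.isIn ['*'] p.toList = true) :
    stringinlist p l2
      = l2.any (fun k => PySem.Str.isIn (PySem.Str.replace p "*" "") k) := by
  unfold stringinlist
  rw [str_isIn_star, if_pos hw]

theorem stringinlist_exact' (p : String) (l2 : List String)
    (hw : PySem.Chars.isIn ['*'] p.toList = false) :
    stringinlist p l2 = l2.contains p := by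
  unfold stringinlist
  rw [str_isIn_star, if_neg (by rw [hw]; simp)]

-- x appears in l2 iff not every element of l2 differs from it.
theorem not_all_ne (x : String) (l2 : List String) :
    ¬ (l2.all (fun s => !(x == s)) = true) ↔ x ∈ l2 := by
  induction l2 with
  | nil => simp
  | cons a t ih =>
    by_cases h : x = a
    · simp [h]
    · simp [h, ih]

theorem strlist_in_strlist_spec_aux (l1 l2 : List String) :
    strlist_in_strlist l1 l2 = strlist_in_strlist_alt l1 l2 := by
  rw [strlist_in_strlist_eq_all]
  simp only [strlist_in_strlist_alt, foldl_split, foldl_step2]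
  rw [Bool.eq_iff_iff, List.all_eq_true, Bool.and_eq_true, List.isEmpty_iff, List.isEmpty_iff,
      List.filter_eq_nil_iff, List.filter_eq_nil_iff]
  constructor
  · intro h
    constructor
    · intro x hx
      rw [mem_foldl_add'] at hx
      rcases hx with hx | hx
      · simp [PySem.Set.empty] at hx
      · have hxw := (List.mem_filter.mp hx).2
        simp only [Bool.not_eq_true'] at hxw
        have := h x (List.mem_filter.mp hx).1
        rw [stringinlist_exact' x l2 hxw] at this
        rw [not_all_ne]
        simpa using this
    · intro t ht
      simp only [List.nil_append, List.mem_map] at ht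
      obtain ⟨p, hp, rfl⟩ := ht
      have hpw := (List.mem_filter.mp hp).2
      rw [str_isIn_star] at hpw
      have := h p (List.mem_filter.mp hp).1
      rw [stringinlist_wild' p l2 hpw] at this
      obtain ⟨s, hs, hm⟩ := List.any_eq_true.mp this
      intro hall
      have h3 := List.all_eq_true.mp hall s hs
      simp only [Bool.not_eq_true'] at h3
      rw [hm] at h3
      simp at h3
  · rintro ⟨he, hw⟩ p hp
    by_cases hstar : PySem.Chars.isIn ['*'] p.toList = true
    · rw [stringinlist_wild' p l2 hstar]
      have h2 := hw _ (by
        simp only [List.nil_append, List.mem_map]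
        exact ⟨p, List.mem_filter.mpr ⟨hp, by rw [str_isIn_star]; exact hstar⟩, rfl⟩)
      simp only [List.all_eq_true, Bool.not_eq_true'] at h2
      push Not at h2
      obtain ⟨s, hs, hm⟩ := h2
      exact List.any_eq_true.mpr ⟨s, hs, by simpa using hm⟩
    · simp only [Bool.not_eq_true] at hstar
      rw [stringinlist_exact' p l2 hstar]
      have h2 := he p ((mem_foldl_add' _ _ _).mpr
        (Or.inr (List.mem_filter.mpr ⟨hp, by rw [str_isIn_star, hstar]; rfl⟩)))
      rw [not_all_ne] at h2
      simpa using h2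

-- ===== VERDICT (by name: the statement is the Claim_ definition above) =====
theorem strlist_in_strlist_spec : Claim_equal_strlist_in_strlist := by
  intro l1 l2 _
  unfold Spec_strlist_in_strlist
  exact strlist_in_strlist_spec_aux l1 l2
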